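-- pv_equiv track=rewrite | github.com/than5466/advent_of_code | day_4/main.py | Contains_Exact_Duplicate
-- ===== SOURCE A (Python) =====
-- def Reoccuring_Digits(Number):
--
--     i = Number[0]
--     count = 1
--     while count < len(Number):
--         if Number[count] == i:
--             count += 1
--
--         else:
--             break
--
--     return count
--
-- def Contains_Exact_Duplicate(Number):
--
--     End = len(Number) - 1
--     Current = 0
--
--     while Current < End:
--         repeated = Reoccuring_Digits(Number[Current:])
--         if repeated == 2:
--             return True
--
--         Current += repeated
--
--     return False
-- ===== SOURCE B (Python) =====
-- def Contains_Exact_Duplicate(Number):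
--     run = 0
--     prev = None
--     for c in Number:
--         if c == prev:
--             run += 1
--         else:
--             if run == 2:
--                 return True
--             prev = c
--             run = 1
--     return run == 2
-- ===== Notes on version B (the rewrite author's own statement) =====
-- stated objective: faster
-- what changed: Replaced the restart-and-slice scan (a fresh slice Number[Current:] and an inner prefix-run count per run) by a single left-to-right pass that maintains the current run length and previous character, with no slicing.
import Mathlib
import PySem

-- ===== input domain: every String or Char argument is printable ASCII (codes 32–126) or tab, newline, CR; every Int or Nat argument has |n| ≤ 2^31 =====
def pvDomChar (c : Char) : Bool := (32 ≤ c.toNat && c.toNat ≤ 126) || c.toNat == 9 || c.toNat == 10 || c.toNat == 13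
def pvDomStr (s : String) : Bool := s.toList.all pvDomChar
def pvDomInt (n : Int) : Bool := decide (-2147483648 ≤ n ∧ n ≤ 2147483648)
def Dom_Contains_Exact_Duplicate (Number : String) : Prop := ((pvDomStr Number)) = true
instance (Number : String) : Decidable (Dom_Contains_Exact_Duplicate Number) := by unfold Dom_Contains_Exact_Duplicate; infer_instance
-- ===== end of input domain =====

-- B replaces A's restart-and-slice run scan by a single left-to-right pass tracking the current run length (objective: faster).

-- ===== PORT A =====
-- Reoccuring_Digits: i = Number[0]; count = 1; while count < len(Number) and Number[count] == i: count += 1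
def pvReoccAux (l : List Char) (i : Char) (count : Nat) : Nat :=
  if _h : count < l.length then
    if l[count]! == i then pvReoccAux l i (count + 1) else count
  else count
termination_by l.length - count

def Reoccuring_Digits (l : List Char) : Nat :=
  pvReoccAux l l[0]! 1

-- lower bound on the loop counter, cited by pvContainsAux's decreasing_by
theorem pvReoccAux_ge (l : List Char) (i : Char) (count : Nat) : count ≤ pvReoccAux l i count := by
  unfold pvReoccAux
  split
  · split
    · have := pvReoccAux_ge l i (count + 1)
      omega
    · omega
  · omega
termination_by l.length - count

-- while Current < End: repeated = Reoccuring_Digits(Number[Current:]); if repeated == 2: return True; Current += repeated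
def pvContainsAux (l : List Char) (current : Nat) : Bool :=
  if _h : (current : Int) < (l.length : Int) - 1 then
    let repeated := Reoccuring_Digits (PySem.List.slice l (some (current : Int)) none)
    if repeated = 2 then true
    else pvContainsAux l (current + repeated)
  else false
termination_by l.length - current
decreasing_by
  have : 1 ≤ Reoccuring_Digits (PySem.List.slice l (some (current : Int)) none) :=
    pvReoccAux_ge _ _ 1
  omega

def Contains_Exact_Duplicate (Number : String) : Bool :=
  pvContainsAux Number.toList 0

-- ===== PORT B =====
-- single pass: previous char and current run length; a maximal run of length exactly 2 → True
def pvAltAux (l : List Char) (prev : Option Char) (run : Nat) : Bool :=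
  match l with
  | [] => run == 2
  | c :: rest =>
    if some c == prev then pvAltAux rest prev (run + 1)
    else if run == 2 then true
    else pvAltAux rest (some c) 1

def Contains_Exact_Duplicate_alt (Number : String) : Bool :=
  pvAltAux Number.toList none 0

-- ===== PRECONDITION & SPEC =====
def Spec_Contains_Exact_Duplicate (Number : String) (out : Bool) : Prop := out = Contains_Exact_Duplicate_alt Number
instance (Number : String) (out : Bool) : Decidable (Spec_Contains_Exact_Duplicate Number out) := by unfold Spec_Contains_Exact_Duplicate; infer_instance

-- ===== CLAIM (what is proved, stated in full; the proofs are below) =====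
def Claim_equal_Contains_Exact_Duplicate : Prop := ∀ (Number : String), Dom_Contains_Exact_Duplicate Number → Spec_Contains_Exact_Duplicate Number (Contains_Exact_Duplicate Number)

-- ===== LEMMAS AND PROOFS =====

-- pvReoccAux counts upward while the character equals i: it returns count + the run length from position count
theorem pvReoccAux_spec (l : List Char) (i : Char) (count : Nat) :
    pvReoccAux l i count = count + ((l.drop count).takeWhile (· == i)).length := by
  unfold pvReoccAux
  split
  · rename_i h
    have hd : l.drop count = l[count] :: l.drop (count + 1) := List.drop_eq_getElem_cons h
    have hbang : l[count]! = l[count] := getElem!_pos l count h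
    rw [hd, List.takeWhile_cons, hbang]
    by_cases hc : (l[count] == i) = true
    · rw [if_pos hc, hc, pvReoccAux_spec l i (count + 1)]
      simp; omega
    · rw [if_neg hc]
      simp at hc
      simp [hc]
  · rename_i h
    have hnil : l.drop count = [] := List.drop_eq_nil_of_le (by omega)
    simp [hnil]
termination_by l.length - count

-- B's scanner at a run boundary (next char, if any, differs from prev)
theorem pvAltAux_boundary (t : List Char) (c : Char) (run : Nat)
    (h : ∀ d t', t = d :: t' → d ≠ c) :
    pvAltAux t (some c) run = if run = 2 then true else pvAltAux t none 0 := by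
  cases t with
  | nil => simp only [pvAltAux]; exact Bool.beq_eq_decide_eq run 2
  | cons d t' =>
    have hd : d ≠ c := h d t' rfl
    simp only [pvAltAux]
    rw [if_neg (by simp [hd])]
    split <;> simp_all

-- B's scanner consumes a replicated run by adding its length to the counter
theorem pvAltAux_replicate (k : Nat) (t : List Char) (c : Char) (run : Nat) :
    pvAltAux (List.replicate k c ++ t) (some c) run = pvAltAux t (some c) (run + k) := by
  induction k generalizing run with
  | zero => simp
  | succ k ih =>
    rw [List.replicate_succ, List.cons_append]
    simp only [pvAltAux, BEq.rfl, if_pos]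
    rw [ih (run + 1)]
    congr 1
    omega

-- main invariant: A's outer loop from position current equals B's fresh scan of the suffix
theorem pv_main (l : List Char) (current : Nat) (hc : current ≤ l.length) :
    pvContainsAux l current = pvAltAux (l.drop current) none 0 := by
  unfold pvContainsAux
  split
  · rename_i h
    have h2 : current + 2 ≤ l.length := by omega
    have hslice : PySem.List.slice l (some (current : Int)) none = l.drop current :=
      PySem.List.slice_from_natCast l current
    have h0 : current < l.length := by omega
    have hd : l.drop current = l[current] :: l.drop (current + 1) := List.drop_eq_getElem_cons h0
    set c := l[current] with hcdef
    set t := l.drop (current + 1) with htdef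
    set m := (t.takeWhile (· == c)).length with hmdef
    have hrep : Reoccuring_Digits (PySem.List.slice l (some (current : Int)) none) = 1 + m := by
      rw [hslice, hd]
      unfold Reoccuring_Digits
      rw [pvReoccAux_spec]
      simp [hmdef]
    have htake : t.takeWhile (· == c) = List.replicate m c := by
      rw [List.eq_replicate_iff]
      refine ⟨rfl, ?_⟩
      intro b hb
      have := List.mem_takeWhile_imp hb
      simpa using this
    have hrest : ∀ d t', t.dropWhile (· == c) = d :: t' → d ≠ c := by
      intro d t' hdt
      have := List.head?_dropWhile_not (· == c) t
      rw [hdt] at this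
      simpa using this
    have halt : pvAltAux (l.drop current) none 0
        = if 1 + m = 2 then true else pvAltAux (t.dropWhile (· == c)) none 0 := by
      rw [hd]
      show pvAltAux (c :: t) none 0 = _
      simp only [pvAltAux]
      rw [if_neg (by simp), if_neg (by simp)]
      conv_lhs => rw [← List.takeWhile_append_dropWhile (p := (· == c)) (l := t), htake]
      rw [pvAltAux_replicate]
      rw [pvAltAux_boundary _ _ _ hrest]
    rw [hrep, halt]
    by_cases hm : 1 + m = 2
    · simp [hm]
    · rw [if_neg hm, if_neg hm]
      have hmle : m ≤ t.length := by
        rw [hmdef]; exact (List.takeWhile_prefix _).length_le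
      have htlen : t.length = l.length - (current + 1) := by
        rw [htdef]; simp
      have hih := pv_main l (current + (1 + m)) (by omega)
      have hdd : l.drop (current + (1 + m)) = t.drop m := by
        rw [htdef, List.drop_drop]
        congr 1
        omega
      have hdw : t.drop m = List.dropWhile (· == c) t := by
        conv_lhs => rw [← List.takeWhile_append_dropWhile (p := (· == c)) (l := t)]
        rw [List.drop_left' (by rw [htake]; simp)]
      rw [hih, hdd, hdw]
  · rename_i h
    have hle : l.length ≤ current + 1 := by omega
    rcases hx : l.drop current with _ | ⟨d, t⟩
    · simp [pvAltAux]
    · have hlen := congrArg List.length hx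
      simp at hlen
      have ht : t = [] := List.eq_nil_of_length_eq_zero (by omega)
      subst ht
      simp [pvAltAux]
termination_by l.length - current

-- ===== VERDICT (by name: the statement is the Claim_ definition above) =====
theorem Contains_Exact_Duplicate_spec : Claim_equal_Contains_Exact_Duplicate := by
  intro Number _
  unfold Spec_Contains_Exact_Duplicate Contains_Exact_Duplicate Contains_Exact_Duplicate_alt
  simpa using pv_main Number.toList 0 (by omega)
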